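-- pv_equiv track=rewrite | github.com/facundovacani/Aprendiendo-python | apuntes/main.py | panprimo
-- ===== SOURCE A (Python) =====
-- def panprimo(n):
--     def esprimo(n):
--         for i in range(2,n):
--             if n % i == 0:
--                 return False
--         return True
--     letra = str(n);
--     ej = "1000000000"
--     if len(letra) < len(ej):
--         return False
--     elif letra.find("1") == -1 or letra.find("2")== -1  or letra.find("3")== -1  or letra.find("4")== -1  or letra.find("5")== -1  or letra.find("6")== -1  or letra.find("7")== -1  or letra.find("8")== -1  or letra.find("9") == -1:
--         return False
--     else:
--         nums = int(letra[-3:])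
--         if esprimo(nums):
--             return True
--         return False
-- ===== SOURCE B (Python) =====
-- def panprimo(n):
--     s = str(n)
--     if len(s) < 10 or any(d not in s for d in "123456789"):
--         return False
--     m = int(s[-3:])
--     i = 2
--     while i * i <= m:
--         if m % i == 0:
--             return False
--         i += 1
--     return True
-- ===== Notes on version B (the rewrite author's own statement) =====
-- stated objective: alternative
-- what changed: B replaces the nine chained letra.find(d) tests by a single any(d not in s) membership scan and replaces esprimo's trial division over the whole range(2,m) by a while loop that trial-divides only while i*i <= m.
import Mathlib
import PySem

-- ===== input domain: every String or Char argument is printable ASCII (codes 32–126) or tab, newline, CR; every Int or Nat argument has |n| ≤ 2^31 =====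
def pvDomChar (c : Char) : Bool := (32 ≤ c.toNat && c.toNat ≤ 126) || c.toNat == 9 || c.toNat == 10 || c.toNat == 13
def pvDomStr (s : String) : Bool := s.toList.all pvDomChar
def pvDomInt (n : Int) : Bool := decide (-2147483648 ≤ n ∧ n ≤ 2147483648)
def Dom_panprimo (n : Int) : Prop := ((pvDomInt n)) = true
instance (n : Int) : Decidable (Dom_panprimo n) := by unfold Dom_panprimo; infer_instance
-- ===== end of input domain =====

-- B keeps the length guard but checks digit presence with one any-scan and trial-divides only while i*i <= m (alternative decomposition).

-- ===== PORT A =====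
-- inner 'for i in range(2, n): if n % i == 0: return False / return True'
def esprimoGo (n : Int) : List Int → Bool
  | [] => true
  | i :: rest => if PySem.Int.mod n i == 0 then false else esprimoGo n rest

def esprimo (n : Int) : Bool := esprimoGo n (PySem.List.pyRange 2 n 1)

def panprimo (n : Int) : Bool :=
  let letra := PySem.Int.toStr n
  let ej := "1000000000"
  if PySem.Str.len letra < PySem.Str.len ej then false
  else if PySem.Str.find letra "1" == -1 || PySem.Str.find letra "2" == -1 ||
          PySem.Str.find letra "3" == -1 || PySem.Str.find letra "4" == -1 ||
          PySem.Str.find letra "5" == -1 || PySem.Str.find letra "6" == -1 ||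
          PySem.Str.find letra "7" == -1 || PySem.Str.find letra "8" == -1 ||
          PySem.Str.find letra "9" == -1 then false
  else
    -- int(letra[-3:]): the last three chars of str(n) are digits here (len ≥ 10), so ofStr? is some; getD 0 is unreachable
    let nums := (PySem.Int.ofStr? (PySem.Str.slice letra (some (-3)) none)).getD 0
    if esprimo nums then true else false

-- ===== PORT B =====
-- 'i = 2; while i * i <= m: if m % i == 0: return False; i += 1; return True'
def bLoop (m i : Int) : Bool :=
  if i * i ≤ m then
    if PySem.Int.mod m i == 0 then false else bLoop m (i + 1)
  else true
termination_by (m + 1 - i).toNat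
decreasing_by
  have hi : i ≤ m := by
    by_cases h0 : i ≤ 0
    · exact le_trans h0 (le_trans (mul_self_nonneg i) (by assumption))
    · simp only [not_le] at h0
      calc i = i * 1 := by ring
        _ ≤ i * i := by nlinarith
        _ ≤ m := by assumption
  omega

def panprimo_alt (n : Int) : Bool :=
  let s := PySem.Int.toStr n
  -- 'if len(s) < 10 or any(d not in s for d in "123456789"): return False'
  if PySem.Str.len s < 10 ||
     (["1","2","3","4","5","6","7","8","9"].any fun d => !PySem.Str.isIn d s) then false
  else
    let m := (PySem.Int.ofStr? (PySem.Str.slice s (some (-3)) none)).getD 0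
    bLoop m 2

-- ===== PRECONDITION & SPEC =====
def Spec_panprimo (n : Int) (out : Bool) : Prop := out = panprimo_alt n
instance (n : Int) (out : Bool) : Decidable (Spec_panprimo n out) := by unfold Spec_panprimo; infer_instance

-- ===== CLAIM (what is proved, stated in full; the proofs are below) =====
def Claim_equal_panprimo : Prop := ∀ (n : Int), Dom_panprimo n → Spec_panprimo n (panprimo n)

-- ===== LEMMAS AND PROOFS =====

theorem esprimoGo_eq_not_any (n : Int) (l : List Int) :
    esprimoGo n l = !(l.any fun i => PySem.Int.mod n i == 0) := by
  induction l with
  | nil => rfl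
  | cons i rest ih =>
    cases h : (PySem.Int.mod n i == 0) <;> simp [esprimoGo, h, ih]

theorem esprimo_eq_true_iff (m : Int) :
    esprimo m = true ↔ ∀ j : Int, 2 ≤ j → j < m → ¬ PySem.Int.mod m j = 0 := by
  simp [esprimo, esprimoGo_eq_not_any, PySem.List.mem_pyRange_one]

theorem bLoop_eq_true_iff (m i : Int) (hi : 1 ≤ i) :
    bLoop m i = true ↔ ∀ j : Int, i ≤ j → j * j ≤ m → ¬ PySem.Int.mod m j = 0 := by
  revert hi
  induction i using bLoop.induct m with
  | case1 i hle hmod =>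
    intro hi
    rw [bLoop]
    simp [hle, beq_iff_eq.mp hmod]
    exact ⟨i, le_refl i, hle, beq_iff_eq.mp hmod⟩
  | case2 i hle hmod ih =>
    intro hi
    rw [bLoop, if_pos hle, if_neg hmod, ih (by omega)]
    constructor
    · intro h j hij hjj
      rcases eq_or_lt_of_le hij with rfl | hlt
      · simpa using hmod
      · exact h j (by omega) hjj
    · intro h j hij hjj; exact h j (by omega) hjj
  | case3 i hle =>
    intro hi
    rw [bLoop]
    simp [hle]
    intro j hij hjj hmod
    exact hle (le_trans (by nlinarith) hjj)

theorem trial_iff_sqrt_trial (m : Int) :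
    (∀ j : Int, 2 ≤ j → j < m → ¬ PySem.Int.mod m j = 0) ↔
    (∀ j : Int, 2 ≤ j → j * j ≤ m → ¬ PySem.Int.mod m j = 0) := by
  constructor
  · intro h j h2 hjj
    exact h j h2 (by nlinarith)
  · intro h j h2 hlt hmod
    have hjpos : (0 : Int) < j := by omega
    have hemod : m % j = 0 := by
      rw [← PySem.Int.mod_eq_emod_of_pos hjpos]; exact hmod
    have hdvd : j ∣ m := Int.dvd_of_emod_eq_zero hemod
    have hm : m / j * j = m := Int.ediv_mul_cancel hdvd
    set k := m / j with hk
    have hk2 : 2 ≤ k := by nlinarith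
    by_cases hcase : j * j ≤ m
    · exact h j h2 hcase hmod
    · have hkj : k < j := by nlinarith
      have hkk : k * k ≤ m := by nlinarith
      have hkdvd : k ∣ m := ⟨j, by linarith [hm]⟩
      have hz : PySem.Int.mod m k = 0 := by
        rw [PySem.Int.mod_eq_emod_of_pos (by omega)]
        exact Int.emod_eq_zero_of_dvd hkdvd
      exact h k hk2 hkk hz

theorem esprimo_eq_bLoop (m : Int) : esprimo m = bLoop m 2 := by
  rw [Bool.eq_iff_iff, esprimo_eq_true_iff, bLoop_eq_true_iff m 2 (by omega)]
  exact trial_iff_sqrt_trial m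

-- ===== VERDICT (by name: the statement is the Claim_ definition above) =====
theorem panprimo_spec : Claim_equal_panprimo := by
  intro n _
  unfold Spec_panprimo panprimo panprimo_alt
  dsimp only
  rw [show PySem.Str.len "1000000000" = 10 from by decide]
  have hfind : ∀ (d : List Char),
      (decide (PySem.Chars.find (PySem.Int.toChars n) d = -1)) =
        !PySem.Chars.isIn d (PySem.Int.toChars n) := by
    intro d
    rw [Bool.eq_iff_iff]
    simp [PySem.Chars.find_eq_neg_one_iff, PySem.Chars.isIn_eq_false_iff]
  simp [hfind, esprimo_eq_bLoop]
  ac_rfl
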